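-- pv_equiv track=rewrite | github.com/theq629/wastrl | wastrl/game/thingsgen.py | sort_city_points
-- ===== SOURCE A (Python) =====
-- def sort_city_points(city_points, mountain_spines):
-- 	city_points_in_area = [[] for _ in range(len(mountain_spines) + 1)]
-- 	for point in city_points:
-- 		put_in = -1
-- 		for i, spine in enumerate(mountain_spines):
-- 			if point[0] > spine[point[1]]:
-- 				put_in = i
-- 				break
-- 		city_points_in_area[put_in].append(point)
-- 	return city_points_in_area
-- ===== SOURCE B (Python) =====
-- def sort_city_points(city_points, mountain_spines):
-- 	remaining = list(city_points)
-- 	buckets = []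
-- 	for spine in mountain_spines:
-- 		hit = []
-- 		miss = []
-- 		for point in remaining:
-- 			if point[0] > spine[point[1]]:
-- 				hit.append(point)
-- 			else:
-- 				miss.append(point)
-- 		buckets.append(hit)
-- 		remaining = miss
-- 	buckets.append(remaining)
-- 	return buckets
-- ===== Notes on version B (the rewrite author's own statement) =====
-- stated objective: alternative
-- what changed: Instead of scanning all spines per point (inner loop with break) and appending into a preallocated bucket list via index -1, B makes one partition pass per spine over a shrinking 'remaining' list, emitting each bucket in order and the leftovers last.
import Mathlib
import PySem

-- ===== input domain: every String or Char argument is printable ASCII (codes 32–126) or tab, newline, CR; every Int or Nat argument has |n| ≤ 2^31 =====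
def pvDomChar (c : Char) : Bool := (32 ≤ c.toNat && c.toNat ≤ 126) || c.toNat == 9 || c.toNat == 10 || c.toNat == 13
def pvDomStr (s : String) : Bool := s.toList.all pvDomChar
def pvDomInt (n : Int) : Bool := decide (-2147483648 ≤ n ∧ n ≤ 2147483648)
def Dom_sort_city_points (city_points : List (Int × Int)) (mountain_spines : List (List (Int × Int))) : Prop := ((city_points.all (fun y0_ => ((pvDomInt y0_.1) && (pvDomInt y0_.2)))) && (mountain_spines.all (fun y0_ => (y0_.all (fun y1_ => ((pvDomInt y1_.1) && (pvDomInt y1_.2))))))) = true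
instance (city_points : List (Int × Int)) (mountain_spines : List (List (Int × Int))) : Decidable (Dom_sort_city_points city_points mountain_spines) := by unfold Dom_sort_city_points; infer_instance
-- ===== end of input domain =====

-- B replaces A's per-point scan over all spines (break on first hit, append at index -1)
-- by one partition pass per spine over a shrinking `remaining` list; an alternative
-- decomposition of the same cost, proved to return the same buckets wherever A returns.


-- ===== PORT A =====
-- inner loop `for i, spine in enumerate(...): if point[0] > spine[point[1]]: put_in = i; break`
-- (i threaded as accumulator; `spine[point[1]]` on a missing key is a KeyError in Python,
-- excluded by Pre_; the port then simply continues, nothing is claimed there)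
def scpFindA (mountain_spines : List (List (Int × Int))) (point : Int × Int) (i : Int) : Int :=
  match mountain_spines with
  | [] => -1
  | spine :: rest =>
    match (PySem.Dict.mk spine).get? point.2 with
    | some v => if point.1 > v then i else scpFindA rest point (i + 1)
    | none => scpFindA rest point (i + 1)

-- `city_points_in_area[put_in].append(point)`; put_in is -1 or 0 ≤ put_in < length here,
-- where `if idx < 0 then idx + length` is exactly Python's negative-index rule
def scpAppendAt (buckets : List (List (Int × Int))) (idx : Int) (point : Int × Int) : List (List (Int × Int)) :=
  let j := if idx < 0 then idx + buckets.length else idx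
  buckets.modify j.toNat (fun b => b ++ [point])

def sort_city_points (city_points : List (Int × Int)) (mountain_spines : List (List (Int × Int))) : List (List (Int × Int)) :=
  city_points.foldl
    (fun buckets point => scpAppendAt buckets (scpFindA mountain_spines point 0) point)
    (List.replicate (mountain_spines.length + 1) [])

-- ===== PORT B =====
-- `point[0] > spine[point[1]]`; missing key = KeyError in Python, excluded by Pre_
def scpHit (spine : List (Int × Int)) (point : Int × Int) : Bool :=
  match (PySem.Dict.mk spine).get? point.2 with
  | some v => point.1 > v
  | none => false

-- one pass per spine: split `remaining` into this spine's bucket and the rest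
def scpGo (remaining : List (Int × Int)) (mountain_spines : List (List (Int × Int))) : List (List (Int × Int)) :=
  match mountain_spines with
  | [] => [remaining]
  | spine :: rest =>
    let (hit, miss) := remaining.partition (scpHit spine)
    hit :: scpGo miss rest

def sort_city_points_alt (city_points : List (Int × Int)) (mountain_spines : List (List (Int × Int))) : List (List (Int × Int)) :=
  scpGo city_points mountain_spines

-- ===== PRECONDITION & SPEC =====
-- Pre_ excludes exactly the inputs on which A raises KeyError: some point's y is missing
-- from a spine that A's scan reaches (all earlier spines have the key and do not exceed the point).
def Pre_sort_city_points (city_points : List (Int × Int)) (mountain_spines : List (List (Int × Int))) : Prop :=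
  ∀ p ∈ city_points, ∀ i : Fin mountain_spines.length,
    (∀ j : Fin mountain_spines.length, (j : Nat) < (i : Nat) →
        ((PySem.Dict.mk mountain_spines[j]).get? p.2).any (fun v => decide (p.1 ≤ v)) = true) →
    ((PySem.Dict.mk mountain_spines[i]).get? p.2).isSome = true
instance (city_points : List (Int × Int)) (mountain_spines : List (List (Int × Int))) : Decidable (Pre_sort_city_points city_points mountain_spines) := by unfold Pre_sort_city_points; infer_instance

def pvWitness_sort_city_points : (List (Int × Int)) × (List (List (Int × Int))) := ([(3, 0), (-2, 0)], [[(0, 1)], [(0, -4)]])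

def Spec_sort_city_points (city_points : List (Int × Int)) (mountain_spines : List (List (Int × Int))) (out : List (List (Int × Int))) : Prop := out = sort_city_points_alt city_points mountain_spines
instance (city_points : List (Int × Int)) (mountain_spines : List (List (Int × Int))) (out : List (List (Int × Int))) : Decidable (Spec_sort_city_points city_points mountain_spines out) := by unfold Spec_sort_city_points; infer_instance

-- ===== CLAIM (what is proved, stated in full; the proofs are below) =====
def Claim_equal_sort_city_points : Prop := ∀ (city_points : List (Int × Int)) (mountain_spines : List (List (Int × Int))), Dom_sort_city_points city_points mountain_spines → Pre_sort_city_points city_points mountain_spines → Spec_sort_city_points city_points mountain_spines (sort_city_points city_points mountain_spines)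

-- ===== LEMMAS AND PROOFS =====

-- A's break-scan decides the first spine exactly by scpHit
theorem scpFindA_cons (spine : List (Int × Int)) (rest : List (List (Int × Int))) (p : Int × Int) (i : Int) :
    scpFindA (spine :: rest) p i = if scpHit spine p then i else scpFindA rest p (i + 1) := by
  cases hg : (PySem.Dict.mk spine).get? p.2 with
  | none => simp [scpFindA, scpHit, hg]
  | some v => by_cases h : p.1 > v <;> simp [scpFindA, scpHit, hg, h]

theorem scpFindA_base (mountain_spines : List (List (Int × Int))) (p : Int × Int) (i : Int) :
    scpFindA mountain_spines p i = -1 ∨ i ≤ scpFindA mountain_spines p i := by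
  induction mountain_spines generalizing i with
  | nil => left; rfl
  | cons s rest ih =>
    rw [scpFindA_cons]
    by_cases h : scpHit s p
    · simp [h]
    · simp only [h, Bool.false_eq_true, if_false]
      rcases ih (i + 1) with h' | h'
      · left; exact h'
      · right; omega

theorem scpFindA_shift (mountain_spines : List (List (Int × Int))) (p : Int × Int) (i : Int) :
    scpFindA mountain_spines p i =
      if scpFindA mountain_spines p 0 = -1 then -1 else scpFindA mountain_spines p 0 + i := by
  induction mountain_spines generalizing i with
  | nil => simp [scpFindA]
  | cons s rest ih =>
    rw [scpFindA_cons, scpFindA_cons]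
    by_cases h : scpHit s p
    · simp [h]
    · simp only [h, Bool.false_eq_true, if_false, zero_add]
      rw [ih (i + 1), ih 1]
      rcases scpFindA_base rest p 0 with h' | h' <;> split_ifs <;> omega

-- pushing one more point into the tail buckets commutes with consing the head bucket
theorem scpAppendAt_tail (b0 : List (Int × Int)) (bs : List (List (Int × Int)))
    (rest : List (List (Int × Int))) (p : Int × Int) (hbs : bs ≠ []) :
    scpAppendAt (b0 :: bs) (scpFindA rest p 1) p = b0 :: scpAppendAt bs (scpFindA rest p 0) p := by
  obtain ⟨n, hn⟩ : ∃ n, bs.length = n + 1 :=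
    ⟨bs.length - 1, by have := List.length_pos_iff.mpr hbs; omega⟩
  rw [scpFindA_shift rest p 1]
  rcases scpFindA_base rest p 0 with h | h
  · simp only [h, scpAppendAt]
    have h1 : ((-1 : Int) + (b0 :: bs).length).toNat = n + 1 := by
      simp only [List.length_cons, hn]; omega
    have h2 : ((-1 : Int) + bs.length).toNat = n := by rw [hn]; push_cast; omega
    simp only [show ((-1 : Int) < 0) = True by simp, if_true, h1, h2, List.modify_succ_cons]
  · have hne : scpFindA rest p 0 ≠ -1 := by omega
    simp only [hne, if_false, scpAppendAt]
    have hnn : ¬ scpFindA rest p 0 + 1 < 0 := by omega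
    have hnn0 : ¬ scpFindA rest p 0 < 0 := by omega
    simp only [hnn, hnn0, if_false]
    have h3 : (scpFindA rest p 0 + 1).toNat = (scpFindA rest p 0).toNat + 1 := by omega
    rw [h3, List.modify_succ_cons]

-- splitting off the first spine from A's fold
theorem scpFold_split (spine : List (Int × Int)) (rest : List (List (Int × Int))) :
    ∀ (cps : List (Int × Int)) (b0 : List (Int × Int)) (bs : List (List (Int × Int))), bs ≠ [] →
    cps.foldl (fun buckets p => scpAppendAt buckets (scpFindA (spine :: rest) p 0) p) (b0 :: bs)
      = (b0 ++ cps.filter (fun p => scpHit spine p))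
        :: (cps.filter (fun p => ! scpHit spine p)).foldl
             (fun buckets p => scpAppendAt buckets (scpFindA rest p 0) p) bs := by
  intro cps
  induction cps with
  | nil => intro b0 bs hbs; simp
  | cons p cps ih =>
    intro b0 bs hbs
    have hstep : scpAppendAt (b0 :: bs) (scpFindA (spine :: rest) p 0) p
        = if scpHit spine p then (b0 ++ [p]) :: bs
          else b0 :: scpAppendAt bs (scpFindA rest p 0) p := by
      rw [scpFindA_cons]
      by_cases h : scpHit spine p
      · simp [h, scpAppendAt, List.modify]
      · simp only [h, Bool.false_eq_true, if_false, zero_add]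
        exact scpAppendAt_tail b0 bs rest p hbs
    rw [List.foldl_cons, hstep]
    by_cases h : scpHit spine p
    · rw [if_pos h, ih (b0 ++ [p]) bs hbs]
      simp [h, List.append_assoc]
    · rw [if_neg h, ih b0 (scpAppendAt bs (scpFindA rest p 0) p)
        (by simp [scpAppendAt, ← List.length_pos_iff, List.length_pos_iff.mpr hbs])]
      simp [h]

-- with no spines every point goes to bucket -1 of the single bucket
theorem scpFold_nil : ∀ (cps a0 : List (Int × Int)),
    cps.foldl (fun buckets p => scpAppendAt buckets (scpFindA [] p 0) p) [a0] = [a0 ++ cps] := by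
  intro cps
  induction cps with
  | nil => intro a0; simp
  | cons p cps ih =>
    intro a0
    have h0 : scpAppendAt [a0] (scpFindA [] p 0) p = [a0 ++ [p]] := by
      simp [scpFindA, scpAppendAt, List.modify]
    rw [List.foldl_cons, h0, ih (a0 ++ [p])]
    simp

theorem scp_main (mountain_spines : List (List (Int × Int))) :
    ∀ cps, sort_city_points cps mountain_spines = scpGo cps mountain_spines := by
  induction mountain_spines with
  | nil => intro cps; simpa [sort_city_points, scpGo] using scpFold_nil cps []
  | cons spine rest ih =>
    intro cps
    simp only [sort_city_points, scpGo, List.partition_eq_filter_filter]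
    rw [show List.replicate ((spine :: rest).length + 1) ([] : List (Int × Int))
          = [] :: List.replicate (rest.length + 1) [] from rfl]
    rw [scpFold_split spine rest cps [] (List.replicate (rest.length + 1) []) (by simp)]
    have hh := ih (cps.filter (fun p => ! scpHit spine p))
    unfold sort_city_points at hh
    rw [hh]
    simp [Function.comp_def]

-- ===== VERDICT (by name: the statement is the Claim_ definition above) =====
theorem sort_city_points_spec : Claim_equal_sort_city_points := by
  intro cps ms _ _
  unfold Spec_sort_city_points sort_city_points_alt
  exact scp_main ms cps
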